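-- pv_equiv track=rewrite | github.com/Ivan-3101/Debt-Collection-Call-Analyzer | analysis_functions.py | analyze_compliance_pattern
-- ===== SOURCE A (Python) =====
-- from typing import Dict, List, Tuple, Any
--
-- SENSITIVE_KEYWORDS = {
--     'balance', 'account number', 'payment history', 'transaction', 'credit score',
--     'debt amount', 'owe', 'outstanding', 'ssn', 'social security', 'bank account',
--     'routing number'
-- }
--
-- VERIFICATION_KEYWORDS = {
--     'date of birth', 'dob', 'address', 'zip code', 'social security number',
--     'mother maiden name', 'security question', 'verify', 'confirm your identity'
-- }
--
-- def analyze_compliance_pattern(data: List[Dict[str, Any]]) -> Tuple[bool, List[Dict]]: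
--     """Analyzes for compliance violations by checking if sensitive info was shared before verification."""
--     violation_details = []
--     verified = False
--
--     for entry in data:
--         speaker = entry.get('speaker', '').lower()
--         text = entry.get('text', '').lower()
--
--         if 'agent' in speaker:
--             # If any verification keyword is found, the agent is considered verified for the rest of the call.
--             if not verified and any(keyword in text for keyword in VERIFICATION_KEYWORDS):
--                 verified = True
--
--             # Check for sensitive info sharing; if not verified, it's a violation.
--             matched_keywords = [kw for kw in SENSITIVE_KEYWORDS if kw in text]
--             if matched_keywords and not verified:
--                 violation_details.append({
--                     'text': entry.get('text', ''),
--                     'timestamp': f"{entry.get('stime', 0)}s - {entry.get('etime', 0)}s",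
--                     'keywords_found': matched_keywords,
--                 })
--
--     # A violation occurred if any such details were logged.
--     violation_found = len(violation_details) > 0
--     return violation_found, violation_details
-- ===== SOURCE B (Python) =====
-- SENSITIVE_KEYWORDS = {
--     'balance', 'account number', 'payment history', 'transaction', 'credit score',
--     'debt amount', 'owe', 'outstanding', 'ssn', 'social security', 'bank account',
--     'routing number'
-- }
--
-- VERIFICATION_KEYWORDS = {
--     'date of birth', 'dob', 'address', 'zip code', 'social security number',
--     'mother maiden name', 'security question', 'verify', 'confirm your identity'
-- }
--
--
-- def analyze_compliance_pattern(data):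
--     """Two-pass decomposition: locate the verification cutoff first, then
--     scan only the entries before it for sensitive disclosures."""
--     def is_agent(entry):
--         return 'agent' in entry.get('speaker', '').lower()
--
--     # Pass 1: index of the first agent entry that verifies identity (exclusive cutoff).
--     cutoff = len(data)
--     for i, entry in enumerate(data):
--         if is_agent(entry) and any(kw in entry.get('text', '').lower()
--                                    for kw in VERIFICATION_KEYWORDS):
--             cutoff = i
--             break
--
--     # Pass 2: sensitive info shared by an agent strictly before the cutoff.
--     violations = []
--     for entry in data[:cutoff]:
--         if is_agent(entry):
--             text = entry.get('text', '').lower()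
--             matched = [kw for kw in SENSITIVE_KEYWORDS if kw in text]
--             if matched:
--                 violations.append({
--                     'text': entry.get('text', ''),
--                     'timestamp': f"{entry.get('stime', 0)}s - {entry.get('etime', 0)}s",
--                     'keywords_found': matched,
--                 })
--     return len(violations) > 0, violations
-- ===== Notes on version B (the rewrite author's own statement) =====
-- stated objective: alternative
-- what changed: Replaces A's single stateful pass with a latching 'verified' flag by a two-pass decomposition: first find the exclusive cutoff index of the first verifying agent entry, then collect sensitive-keyword violations only from agent entries strictly before that cutoff.
import Mathlib
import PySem

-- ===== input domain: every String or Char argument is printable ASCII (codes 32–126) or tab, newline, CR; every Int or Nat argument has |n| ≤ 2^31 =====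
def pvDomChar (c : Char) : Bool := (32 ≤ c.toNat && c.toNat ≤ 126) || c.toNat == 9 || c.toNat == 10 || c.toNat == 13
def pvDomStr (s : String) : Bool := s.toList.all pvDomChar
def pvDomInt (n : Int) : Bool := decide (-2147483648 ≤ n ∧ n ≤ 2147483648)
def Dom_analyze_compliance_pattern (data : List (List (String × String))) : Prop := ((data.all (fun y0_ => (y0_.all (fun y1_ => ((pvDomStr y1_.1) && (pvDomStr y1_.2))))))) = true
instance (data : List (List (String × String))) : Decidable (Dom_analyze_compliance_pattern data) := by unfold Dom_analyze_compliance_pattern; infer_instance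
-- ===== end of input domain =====

-- B changes the decomposition only (single latching-flag pass → cutoff index + bounded second pass); equal return values, no speed claim.
-- Representation note: Python's 'keywords_found' value is a LIST of keywords (iterated
-- from a set); under the String-valued dict convention BOTH ports encode it as the
-- matched keywords in source-literal order joined by ", " — the same encoding on both
-- sides, so the equivalence claim is unaffected; everything else is exact.

-- Shared module constants (Python set literals kept in source order; 'any' over a set is
-- order-independent, and both ports iterate the set in this same fixed order).
def pvSensitive : List String :=
  ["balance", "account number", "payment history", "transaction", "credit score",
   "debt amount", "owe", "outstanding", "ssn", "social security", "bank account",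
   "routing number"]

def pvVerification : List String :=
  ["date of birth", "dob", "address", "zip code", "social security number",
   "mother maiden name", "security question", "verify", "confirm your identity"]

-- entry.get(k, dflt) on the association list (first binding wins)
def pvGet (e : List (String × String)) (k dflt : String) : String := (e.lookup k).getD dflt

def pvIsAgent (e : List (String × String)) : Bool :=
  PySem.Str.isIn "agent" (PySem.Str.lower (pvGet e "speaker" ""))

def pvText (e : List (String × String)) : String := PySem.Str.lower (pvGet e "text" "")

-- the violation dict ('keywords_found' joined with ", ", see representation note above)
def pvMkViolation (e : List (String × String)) (matched : List String) : List (String × String) :=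
  [("text", pvGet e "text" ""),
   ("timestamp", pvGet e "stime" "0" ++ "s - " ++ pvGet e "etime" "0" ++ "s"),
   ("keywords_found", PySem.Str.join ", " matched)]

-- ===== PORT A ===== (single pass, 'verified' latches before the sensitive check)
def pvLoopA : List (List (String × String)) → Bool → List (List (String × String))
  | [], _ => []
  | e :: rest, verified =>
    if pvIsAgent e then
      let verified' := verified || pvVerification.any (fun kw => PySem.Str.isIn kw (pvText e))
      let matched := pvSensitive.filter (fun kw => PySem.Str.isIn kw (pvText e))
      if !matched.isEmpty && !verified' then
        pvMkViolation e matched :: pvLoopA rest verified'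
      else
        pvLoopA rest verified'
    else
      pvLoopA rest verified

def analyze_compliance_pattern (data : List (List (String × String))) : Bool × (List (List (String × String))) :=
  let violation_details := pvLoopA data false
  (!violation_details.isEmpty, violation_details)

-- ===== PORT B ===== (pass 1: exclusive cutoff index; pass 2: scan data.take cutoff)
def pvCutoff : List (List (String × String)) → Nat
  | [] => 0
  | e :: rest =>
    if pvIsAgent e && pvVerification.any (fun kw => PySem.Str.isIn kw (pvText e)) then 0
    else pvCutoff rest + 1

def pvViolationsB (entries : List (List (String × String))) : List (List (String × String)) :=
  entries.filterMap (fun e =>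
    if pvIsAgent e then
      let matched := pvSensitive.filter (fun kw => PySem.Str.isIn kw (pvText e))
      if matched.isEmpty then none else some (pvMkViolation e matched)
    else none)

def analyze_compliance_pattern_alt (data : List (List (String × String))) : Bool × (List (List (String × String))) :=
  let violations := pvViolationsB (data.take (pvCutoff data))
  (!violations.isEmpty, violations)

-- ===== PRECONDITION & SPEC =====
def Spec_analyze_compliance_pattern (data : List (List (String × String))) (out : Bool × (List (List (String × String)))) : Prop := out = analyze_compliance_pattern_alt data
instance (data : List (List (String × String))) (out : Bool × (List (List (String × String)))) : Decidable (Spec_analyze_compliance_pattern data out) := by unfold Spec_analyze_compliance_pattern; infer_instance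

-- ===== CLAIM (what is proved, stated in full; the proofs are below) =====
def Claim_equal_analyze_compliance_pattern : Prop := ∀ (data : List (List (String × String))), Dom_analyze_compliance_pattern data → Spec_analyze_compliance_pattern data (analyze_compliance_pattern data)

-- ===== LEMMAS AND PROOFS =====

-- Once verified, A logs nothing further.
theorem pvLoopA_true (l : List (List (String × String))) : pvLoopA l true = [] := by
  induction l with
  | nil => rfl
  | cons e rest ih => simp [pvLoopA, ih]

-- A's single pass computes exactly B's bounded second pass over the prefix before the cutoff.
theorem pvLoopA_eq (l : List (List (String × String))) :
    pvLoopA l false = pvViolationsB (l.take (pvCutoff l)) := by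
  induction l with
  | nil => rfl
  | cons e rest ih =>
    by_cases ha : pvIsAgent e = true
    · by_cases hv : pvVerification.any (fun kw => PySem.Str.isIn kw (pvText e)) = true
      · simp only [pvLoopA, pvCutoff, pvViolationsB, ha, hv, Bool.and_self, if_true,
          Bool.false_or, Bool.not_true, Bool.and_false, List.take_zero, List.filterMap_nil,
          pvLoopA_true, Bool.false_eq_true, if_false]
      · simp only [pvLoopA, pvCutoff, pvViolationsB, ha, hv, Bool.and_false, Bool.false_or,
          Bool.not_false, Bool.and_true, if_false, Bool.false_eq_true, List.take_succ_cons,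
          List.filterMap_cons, if_true]
        rw [ih]
        by_cases hm : (pvSensitive.filter (fun kw => PySem.Str.isIn kw (pvText e))).isEmpty = true
        · simp only [List.isEmpty_iff.mp hm]
          simp [pvViolationsB]
        · simp only [hm]
          simp [pvViolationsB]
    · simp only [pvLoopA, pvCutoff, pvViolationsB, ha, Bool.false_and, Bool.false_eq_true,
        if_false, List.take_succ_cons, List.filterMap_cons, ih]

-- ===== VERDICT (by name: the statement is the Claim_ definition above) =====
theorem analyze_compliance_pattern_spec : Claim_equal_analyze_compliance_pattern := by
  intro data _
  show analyze_compliance_pattern data = analyze_compliance_pattern_alt data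
  simp [analyze_compliance_pattern, analyze_compliance_pattern_alt, pvLoopA_eq]
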